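-- pv_equiv track=rewrite | github.com/whiprandolph/bestseller | toc.py | make_link
-- ===== SOURCE A (Python) =====
-- def make_link(line):
--   try:
--     pounds, title = line.split(" ", 1)
--   except ValueError:
--     raise ValueError("pounds w/no title: %s" % line)
--   title = title.strip()
--
--   link_title = title.replace(" ", "-")
--   link_title = link_title.replace(")", "\)")
--   link_title = link_title.replace("(", "\(")
--   link_title = link_title.lower()
--   for char in (":;@,\"'"):
--     link_title = link_title.replace(char, "")
--
--   return "[%s](#%s)" % (title, link_title)
-- ===== SOURCE B (Python) =====
-- _MAP = {" ": "-", "(": "\\(", ")": "\\)",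
--         ":": "", ";": "", "@": "", ",": "", '"': "", "'": ""}
--
--
-- def make_link(line):
--   try:
--     pounds, title = line.split(" ", 1)
--   except ValueError:
--     raise ValueError("pounds w/no title: %s" % line)
--   title = title.strip()
--   link_title = "".join(_MAP.get(c, c.lower()) for c in title)
--   return "[%s](#%s)" % (title, link_title)
-- ===== Notes on version B (the rewrite author's own statement) =====
-- stated objective: simpler
-- what changed: The chain of five full-string .replace passes plus the six-iteration removal loop is replaced by one table-driven pass over the title: each character is looked up in a literal mapping (space->'-', parens->escaped, the six removed chars->'') and otherwise lowercased, and the pieces are joined once.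
import Mathlib
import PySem

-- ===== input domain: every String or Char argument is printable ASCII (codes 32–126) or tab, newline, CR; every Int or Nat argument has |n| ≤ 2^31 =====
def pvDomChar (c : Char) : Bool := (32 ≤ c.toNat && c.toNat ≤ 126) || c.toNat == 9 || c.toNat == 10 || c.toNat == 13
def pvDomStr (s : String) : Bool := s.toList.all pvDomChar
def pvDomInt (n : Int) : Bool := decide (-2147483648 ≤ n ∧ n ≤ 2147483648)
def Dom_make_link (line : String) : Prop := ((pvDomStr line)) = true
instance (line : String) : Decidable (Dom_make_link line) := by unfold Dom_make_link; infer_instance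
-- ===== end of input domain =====

-- B replaces A's chain of full-string replace passes plus the removal loop by one
-- table-driven pass over the title's characters (objective: simpler); same return value.

-- ===== PORT A =====
-- A, step for step: split(" ", 1), strip, the three replaces, lower, the removal loop,
-- then "[%s](#%s)".  String work is done on the List Char side via PySem.Chars.
def make_link (line : String) : String :=
  match PySem.Str.splitMax? line " " 1 with
  | some [_pounds, title0] =>
      let title := PySem.Chars.strip title0.toList
      let lt1 := PySem.Chars.replace title [' '] ['-']
      let lt2 := PySem.Chars.replace lt1 [')'] ['\\', ')']
      let lt3 := PySem.Chars.replace lt2 ['('] ['\\', '(']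
      let lt4 := PySem.Chars.lower lt3
      let lt5 := [':', ';', '@', ',', '"', '\''].foldl
        (fun s c => PySem.Chars.replace s [c] []) lt4
      String.ofList ('[' :: title ++ ']' :: '(' :: '#' :: lt5 ++ [')'])
  | _ => ""   -- unreachable under Pre_make_link (Python raises ValueError here)

-- ===== PORT B =====
-- the per-character table _MAP.get(c, c.lower()) of Source B
def linkChar (c : Char) : List Char :=
  if c = ' ' then ['-']
  else if c = '(' then ['\\', '(']
  else if c = ')' then ['\\', ')']
  else if c = ':' ∨ c = ';' ∨ c = '@' ∨ c = ',' ∨ c = '"' ∨ c = '\'' then []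
  else [PySem.Chars.lowerChar c]

-- Source B's body after split/strip: build the result from the stripped title in one pass
def altBuild (parts : List String) : String :=
  if parts.length = 2 then     -- the two-name unpack of Source B
    (parts[1]?).elim ""        -- never "" when the length is 2
      (fun title0 =>
        let title := PySem.Chars.strip title0.toList
        String.ofList ('[' :: title ++ ']' :: '(' :: '#' :: title.flatMap linkChar ++ [')']))
  else ""   -- unreachable under Pre_make_link (Python raises ValueError here)

def make_link_alt (line : String) : String :=
  altBuild ((PySem.Str.splitMax? line " " 1).getD [])   -- split(" ", 1) is never None: sep ≠ ""

-- ===== PRECONDITION & SPEC =====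
-- Python A raises ValueError when the line contains no space (the 2-tuple unpacking fails).
def Pre_make_link (line : String) : Prop := ' ' ∈ line.toList
instance (line : String) : Decidable (Pre_make_link line) := by unfold Pre_make_link; infer_instance
def pvWitness_make_link : String := "## Title (One): ok"

def Spec_make_link (line : String) (out : String) : Prop := out = make_link_alt line
instance (line : String) (out : String) : Decidable (Spec_make_link line out) := by unfold Spec_make_link; infer_instance

-- ===== CLAIM (what is proved, stated in full; the proofs are below) =====
def Claim_equal_make_link : Prop := ∀ (line : String), Dom_make_link line → Pre_make_link line → Spec_make_link line (make_link line)

-- ===== LEMMAS AND PROOFS =====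

-- a Char → List Char step applied via replace: replace with a single-char pattern is flatMap
lemma replace_go_single (a : Char) (r : List Char) :
    ∀ (fuel : Nat) (l acc : List Char), l.length ≤ fuel →
      PySem.Chars.replace.go [a] r fuel l acc
        = acc.reverse ++ l.flatMap (fun c => if c = a then r else [c]) := by
  intro fuel
  induction fuel with
  | zero =>
      intro l acc h
      have : l = [] := List.length_eq_zero_iff.mp (Nat.le_zero.mp h)
      subst this
      simp [PySem.Chars.replace.go]
  | succ n ih =>
      intro l acc h
      cases l with
      | nil => simp [PySem.Chars.replace.go]
      | cons c t =>
          simp only [PySem.Chars.replace.go]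
          by_cases hc : c = a
          · subst hc
            have hpre : [c].isPrefixOf (c :: t) = true := by
              simp [List.isPrefixOf]
            rw [if_pos hpre]
            simp only [List.length_cons, List.length_nil, Nat.zero_add,
              List.drop_succ_cons, List.drop_zero]
            rw [ih t (r.reverse ++ acc) (by simpa using Nat.le_of_succ_le_succ h)]
            simp
          · have hpre : [a].isPrefixOf (c :: t) = false := by
              simp only [List.isPrefixOf, Bool.and_eq_false_iff]
              left
              simpa using fun h => hc h.symm
            rw [if_neg (by simp [hpre])]
            rw [ih t (c :: acc) (by simpa using Nat.le_of_succ_le_succ h)]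
            simp [hc]

lemma replace_single (s : List Char) (a : Char) (r : List Char) :
    PySem.Chars.replace s [a] r = s.flatMap (fun c => if c = a then r else [c]) := by
  simp [PySem.Chars.replace, replace_go_single a r s.length s [] le_rfl]

-- lowering a character cannot produce one of the removed punctuation characters
lemma lowerChar_ne (c x : Char) (hx : x.toNat < 97) (hne : c ≠ x) :
    PySem.Chars.lowerChar c ≠ x := by
  unfold PySem.Chars.lowerChar
  split
  · rename_i hup
    simp only [PySem.Chars.isupper, Bool.and_eq_true, decide_eq_true_eq] at hup
    obtain ⟨ha, hb⟩ := hup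
    rw [Char.le_def] at ha hb
    have h1 := UInt32.le_iff_toNat_le.mp ha
    have h2 := UInt32.le_iff_toNat_le.mp hb
    have e1 : ('A' : Char).val.toNat = 65 := rfl
    have e2 : ('Z' : Char).val.toNat = 90 := rfl
    have h1' : 65 ≤ c.toNat := by show 65 ≤ c.val.toNat; omega
    have h2' : c.toNat ≤ 90 := by show c.val.toNat ≤ 90; omega
    have hv : (c.toNat + 32).isValidChar := Or.inl (by omega)
    intro h
    have h3 := congrArg Char.toNat h
    rw [Char.toNat_ofNat, if_pos hv] at h3
    omega
  · exact hne

-- the per-character composition of A's passes equals B's table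
lemma charStep (c : Char) :
    List.flatMap (fun d => if d = '\'' then [] else [d])
      (List.flatMap (fun d => if d = '"' then [] else [d])
        (List.flatMap (fun d => if d = ',' then [] else [d])
          (List.flatMap (fun d => if d = '@' then [] else [d])
            (List.flatMap (fun d => if d = ';' then [] else [d])
              (List.flatMap (fun d => if d = ':' then [] else [d])
                (List.flatMap
                  (fun a => List.map PySem.Chars.lowerChar (if a = '(' then ['\\', '('] else [a]))
                  (List.flatMap (fun d => if d = ')' then ['\\', ')'] else [d])
                    (if c = ' ' then ['-'] else [c]))))))))
      = linkChar c := by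
  by_cases h1 : c = ' '
  · subst h1; decide
  by_cases h2 : c = '('
  · subst h2; decide
  by_cases h3 : c = ')'
  · subst h3; decide
  by_cases h4 : c = ':' ∨ c = ';' ∨ c = '@' ∨ c = ',' ∨ c = '"' ∨ c = '\''
  · rcases h4 with h | h | h | h | h | h <;> subst h <;> decide
  · push Not at h4
    obtain ⟨n1, n2, n3, n4, n5, n6⟩ := h4
    simp [linkChar, h1, h2, h3, n1, n2, n3, n4, n5, n6,
      lowerChar_ne c ':' (by decide) n1,
      lowerChar_ne c ';' (by decide) n2,
      lowerChar_ne c '@' (by decide) n3,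
      lowerChar_ne c ',' (by decide) n4,
      lowerChar_ne c '"' (by decide) n5,
      lowerChar_ne c '\'' (by decide) n6]

-- A's whole title pipeline equals B's single pass
lemma pipeline_eq (t : List Char) :
    [':', ';', '@', ',', '"', '\''].foldl (fun s c => PySem.Chars.replace s [c] [])
      (PySem.Chars.lower
        (PySem.Chars.replace
          (PySem.Chars.replace (PySem.Chars.replace t [' '] ['-']) [')'] ['\\', ')'])
          ['('] ['\\', '(']))
      = t.flatMap linkChar := by
  simp only [List.foldl_cons, List.foldl_nil, replace_single, PySem.Chars.lower,
    List.map_flatMap]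
  induction t with
  | nil => simp
  | cons c t ih =>
      simp only [List.flatMap_cons (xs := t), List.flatMap_append]
      exact congrArg₂ (· ++ ·) (charStep c) ih

-- ===== VERDICT (by name: the statement is the Claim_ definition above) =====
theorem make_link_spec : Claim_equal_make_link := by
  intro line _hdom _hpre
  unfold Spec_make_link make_link make_link_alt
  cases h : PySem.Str.splitMax? line " " 1 with
  | none => rfl
  | some parts =>
      match parts with
      | [] => rfl
      | [_] => rfl
      | [_p, t0] =>
          simp only [Option.getD_some, altBuild, List.length_cons, List.length_nil,
            List.getElem?_cons_succ, List.getElem?_cons_zero, Option.elim, if_pos,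
            pipeline_eq]
      | _ :: _ :: _ :: _ => rfl
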